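-- pv_equiv track=rewrite | github.com/curious-machines/typed_tables | src/typed_tables/repl.py | _balance_counts
-- ===== SOURCE A (Python) =====
-- def _balance_counts(text: str) -> tuple[int, int, int]:
--     """Return (paren_balance, brace_balance, bracket_balance) for text, ignoring strings."""
--     paren = 0
--     brace = 0
--     bracket = 0
--     in_string = False
--     escape_next = False
--     for ch in text:
--         if escape_next:
--             escape_next = False
--             continue
--         if ch == '\\' and in_string:
--             escape_next = True
--             continue
--         if ch == '"':
--             in_string = not in_string
--             continue
--         if in_string:
--             continue
--         if ch == '(':
--             paren += 1
--         elif ch == ')':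
--             paren -= 1
--         elif ch == '{':
--             brace += 1
--         elif ch == '}':
--             brace -= 1
--         elif ch == '[':
--             bracket += 1
--         elif ch == ']':
--             bracket -= 1
--     return paren, brace, bracket
-- ===== SOURCE B (Python) =====
-- def _balance_counts(text: str) -> tuple[int, int, int]:
--     # Phase 1: delete string literals (escape-aware skip); Phase 2: count brackets.
--     parts = []
--     i, n = 0, len(text)
--     while i < n:
--         c = text[i]
--         if c == '"':
--             i += 1
--             while i < n:
--                 if text[i] == '"':
--                     i += 1
--                     break
--                 i += 2 if text[i] == '\\' else 1
--         else:
--             parts.append(c)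
--             i += 1
--     code = ''.join(parts)
--     return (code.count('(') - code.count(')'),
--             code.count('{') - code.count('}'),
--             code.count('[') - code.count(']'))
-- ===== Notes on version B (the rewrite author's own statement) =====
-- stated objective: alternative
-- what changed: Replaces the single-pass in_string/escape_next flag machine with a two-phase algorithm: first delete all string literals via an escape-aware skip, then tally each bracket type with str.count on the cleaned text.
import Mathlib
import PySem

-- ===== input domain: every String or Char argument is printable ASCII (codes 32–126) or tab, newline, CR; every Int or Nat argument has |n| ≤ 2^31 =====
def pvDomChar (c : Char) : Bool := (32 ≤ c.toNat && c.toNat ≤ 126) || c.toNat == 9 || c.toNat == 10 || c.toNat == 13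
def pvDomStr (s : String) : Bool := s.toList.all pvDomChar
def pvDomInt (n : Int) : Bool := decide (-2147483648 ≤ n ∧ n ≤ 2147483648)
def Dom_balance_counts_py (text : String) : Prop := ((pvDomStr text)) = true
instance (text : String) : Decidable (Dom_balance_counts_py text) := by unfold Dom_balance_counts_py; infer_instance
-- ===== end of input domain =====

-- B replaces A's one-pass in_string/escape_next flag machine by a two-phase algorithm
-- (delete string literals, then count each bracket); same return value on every input (A is total).

-- ===== PORT A =====
-- loop body of A; state: (paren, brace, bracket, in_string, escape_next)
def pvStepA (st : Int × Int × Int × Bool × Bool) (ch : Char) : Int × Int × Int × Bool × Bool :=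
  let (p, b, k, ins, esc) := st
  if esc then (p, b, k, ins, false)
  else if ch = '\\' ∧ ins then (p, b, k, ins, true)
  else if ch = '"' then (p, b, k, !ins, false)
  else if ins then (p, b, k, ins, esc)
  else if ch = '(' then (p + 1, b, k, ins, esc)
  else if ch = ')' then (p - 1, b, k, ins, esc)
  else if ch = '{' then (p, b + 1, k, ins, esc)
  else if ch = '}' then (p, b - 1, k, ins, esc)
  else if ch = '[' then (p, b, k + 1, ins, esc)
  else if ch = ']' then (p, b, k - 1, ins, esc)
  else (p, b, k, ins, esc)

def balance_counts_py (text : String) : Int × Int × Int :=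
  let (p, b, k, _, _) := text.toList.foldl pvStepA (0, 0, 0, false, false)
  (p, b, k)

-- ===== PORT B =====
-- inner while loop of Source B: consume the remainder of a string literal (after its opening quote)
def pvSkipStr : List Char → List Char
  | [] => []
  | '"' :: rest => rest
  | '\\' :: [] => []
  | '\\' :: _ :: rest => pvSkipStr rest
  | _ :: rest => pvSkipStr rest

theorem pvSkipStr_length_le (l : List Char) : (pvSkipStr l).length ≤ l.length := by
  induction l using pvSkipStr.induct <;> simp [pvSkipStr] <;> omega

-- outer while loop of Source B: copy chars, deleting string literals
def pvStrip : List Char → List Char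
  | [] => []
  | '"' :: rest => pvStrip (pvSkipStr rest)
  | c :: rest => c :: pvStrip rest
termination_by l => l.length
decreasing_by
  · have := pvSkipStr_length_le rest; simp; omega
  · simp

def balance_counts_py_alt (text : String) : Int × Int × Int :=
  let code := pvStrip text.toList
  ((List.count '(' code : Int) - (List.count ')' code : Int),
   (List.count '{' code : Int) - (List.count '}' code : Int),
   (List.count '[' code : Int) - (List.count ']' code : Int))

-- ===== PRECONDITION & SPEC =====
def Spec_balance_counts_py (text : String) (out : Int × Int × Int) : Prop := out = balance_counts_py_alt text
instance (text : String) (out : Int × Int × Int) : Decidable (Spec_balance_counts_py text out) := by unfold Spec_balance_counts_py; infer_instance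

-- ===== CLAIM (what is proved, stated in full; the proofs are below) =====
def Claim_equal_balance_counts_py : Prop := ∀ (text : String), Dom_balance_counts_py text → Spec_balance_counts_py text (balance_counts_py text)

-- ===== LEMMAS AND PROOFS =====
def pvProj (st : Int × Int × Int × Bool × Bool) : Int × Int × Int := (st.1, st.2.1, st.2.2.1)

-- inside a string literal (escape flag clear), A's loop amounts to skipping to after the literal
theorem pvRun_instring (l : List Char) (p b k : Int) :
    pvProj (l.foldl pvStepA (p, b, k, true, false)) =
    pvProj ((pvSkipStr l).foldl pvStepA (p, b, k, false, false)) := by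
  induction l using pvSkipStr.induct generalizing p b k with
  | case5 c rest h1 h2 h3 ih =>
      have hb : ¬ c = '\\' := by
        intro hc
        cases rest with
        | nil => exact h2 hc rfl
        | cons a t => exact h3 a t hc rfl
      simp_all [pvSkipStr, List.foldl, pvStepA, pvProj]
  | _ => simp_all [pvSkipStr, List.foldl, pvStepA, pvProj]

theorem pvStepA_clean (c : Char) (h : ¬ c = '"') (p b k : Int) :
    pvStepA (p, b, k, false, false) c =
    (p + ((if c = '(' then (1:Int) else 0) - (if c = ')' then (1:Int) else 0)),
     b + ((if c = '{' then (1:Int) else 0) - (if c = '}' then (1:Int) else 0)),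
     k + ((if c = '[' then (1:Int) else 0) - (if c = ']' then (1:Int) else 0)),
     false, false) := by
  simp only [pvStepA]
  rw [if_neg (by simp), if_neg (by simp), if_neg h, if_neg (by simp)]
  split_ifs with h1 h2 h3 h4 h5 h6 <;> simp_all <;> ring

theorem pvCount_pair (a b c : Char) (m : List Char) :
    ((List.count a (c :: m) : Int) - (List.count b (c :: m) : Int)) =
    ((List.count a m : Int) - (List.count b m : Int)) +
      ((if c = a then (1:Int) else 0) - (if c = b then (1:Int) else 0)) := by
  simp only [List.count_cons]
  by_cases h1 : c = a <;> by_cases h2 : c = b <;> simp [h1, h2] <;> ring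

-- outside strings, A's loop computes exactly the bracket tallies of the stripped text
theorem pvRun_clean (l : List Char) (p b k : Int) :
    pvProj (l.foldl pvStepA (p, b, k, false, false)) =
    (p + ((List.count '(' (pvStrip l) : Int) - (List.count ')' (pvStrip l) : Int)),
     b + ((List.count '{' (pvStrip l) : Int) - (List.count '}' (pvStrip l) : Int)),
     k + ((List.count '[' (pvStrip l) : Int) - (List.count ']' (pvStrip l) : Int))) := by
  induction l using pvStrip.induct generalizing p b k with
  | case1 => simp [pvStrip, pvProj]
  | case2 rest ih =>
      simp only [pvStrip, List.foldl]
      rw [show pvStepA (p, b, k, false, false) '"' = (p, b, k, true, false) from by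
        simp [pvStepA]]
      rw [pvRun_instring]
      exact ih p b k
  | case3 c rest h ih =>
      simp only [pvStrip, List.foldl]
      rw [pvStepA_clean c h, ih,
        pvCount_pair '(' ')' c (pvStrip rest),
        pvCount_pair '{' '}' c (pvStrip rest),
        pvCount_pair '[' ']' c (pvStrip rest)]
      simp only [Prod.mk.injEq]
      refine ⟨by ring, by ring, by ring⟩

-- ===== VERDICT (by name: the statement is the Claim_ definition above) =====
theorem balance_counts_py_spec : Claim_equal_balance_counts_py := by
  intro text _
  unfold Spec_balance_counts_py balance_counts_py balance_counts_py_alt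
  have h := pvRun_clean text.toList 0 0 0
  rcases hst : text.toList.foldl pvStepA (0, 0, 0, false, false) with ⟨p, b, k, ins, esc⟩
  rw [hst] at h
  simp only [pvProj, Prod.mk.injEq, zero_add] at h
  simp [h.1, h.2.1, h.2.2]
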